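-- pv_equiv track=rewrite | github.com/Armin-Smailzade/infomod | infomod_submit.py | rec
-- ===== SOURCE A (Python) =====
-- def rec(lst, i):
--     if i == len(lst):
--         return [list(map(lambda x: None, lst))]
--     else:
--         ret=[]
--         half = rec(lst, i+1)
--         for r in half:
--             ret.append(r)
--             # if not lst[i] == None:
--             cr = r[:]
--             cr[i]=lst[i]
--             ret.append(cr)
--         return ret
-- ===== SOURCE B (Python) =====
-- def rec(lst, i):
--     n = len(lst)
--     m = n - i
--     return [[lst[j] if i <= j and (k >> (j - i)) & 1 else None for j in range(n)]
--             for k in range(2 ** m)]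
-- ===== Notes on version B (the rewrite author's own statement) =====
-- stated objective: alternative
-- what changed: replaces the recursion over positions (doubling the result list at each level) by a single loop over the 2^(n-i) bitmasks, building each masked row directly from the bits of k
-- outside the precondition, e.g. on rec([1], -1): A returns [[None], [1], [1], [1]], B returns [[None], [None], [1], [1]]; on rec([1, 2], 3): A raises RecursionError, B raises TypeError
import Mathlib
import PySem

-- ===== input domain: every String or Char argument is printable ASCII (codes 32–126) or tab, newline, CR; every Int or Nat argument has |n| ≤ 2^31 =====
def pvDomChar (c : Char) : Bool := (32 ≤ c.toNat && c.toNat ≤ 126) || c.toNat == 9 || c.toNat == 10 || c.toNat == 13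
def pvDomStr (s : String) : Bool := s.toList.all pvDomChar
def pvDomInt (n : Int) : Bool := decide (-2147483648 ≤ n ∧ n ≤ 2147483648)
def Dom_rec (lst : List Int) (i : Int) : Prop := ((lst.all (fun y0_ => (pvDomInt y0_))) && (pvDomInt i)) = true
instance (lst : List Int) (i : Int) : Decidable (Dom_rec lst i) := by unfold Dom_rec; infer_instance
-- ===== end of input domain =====

-- B replaces A's recursion over positions by one loop over the 2^(n-i) bitmasks (alternative decomposition, same cost).


-- ===== PORT A =====
-- Transliteration of A. Inside Pre_ (0 ≤ i ≤ len lst) the recursion reaches the base case and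
-- every index is in range, so `List.set r i.toNat` and `lst.getD i.toNat 0` are exact for
-- Python's `cr[i] = lst[i]`. The `else []` guard only makes total the inputs (i > len) on
-- which Python A recurses forever; those are outside Pre_.
def rec (lst : List Int) (i : Int) : List (List (Option Int)) :=
  if i = (lst.length : Int) then
    [lst.map (fun _ => (none : Option Int))]
  else if h : (lst.length : Int) - i ≤ 0 then []
  else
    let half := rec lst (i + 1)
    half.foldl (fun ret r =>
      (ret ++ [r]) ++ [r.set i.toNat (some (lst.getD i.toNat 0))]) []
termination_by ((lst.length : Int) - i).toNat
decreasing_by omega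

-- ===== PORT B =====
-- Transliteration of Source B: rows indexed by bitmask k, `(k >> (j - i)) & 1` decides position j.
def rec_alt (lst : List Int) (i : Int) : List (List (Option Int)) :=
  let n := lst.length
  let m := ((n : Int) - i).toNat
  (List.range (2 ^ m)).map (fun k =>
    (List.range n).map (fun (j : Nat) =>
      if i ≤ (j : Int) ∧ (k >>> (j - i.toNat)) &&& 1 = 1 then some (lst.getD j 0) else none))

-- ===== PRECONDITION & SPEC =====
-- Pre_ keeps the natural domain of the recursion index: 0 ≤ i ≤ len(lst). For i > len(lst) A
-- never terminates (RecursionError); for i < 0 A returns a value only by Python's accidental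
-- negative-index wraparound (it overwrites tail slots repeatedly), a corner no caller specifies.
def Pre_rec (lst : List Int) (i : Int) : Prop := 0 ≤ i ∧ i ≤ (lst.length : Int)
instance (lst : List Int) (i : Int) : Decidable (Pre_rec lst i) := by unfold Pre_rec; infer_instance
def pvWitness_rec : List Int × Int := ([1, 2, 3], 0)

def Spec_rec (lst : List Int) (i : Int) (out : List (List (Option Int))) : Prop := out = rec_alt lst i
instance (lst : List Int) (i : Int) (out : List (List (Option Int))) : Decidable (Spec_rec lst i out) := by unfold Spec_rec; infer_instance

-- ===== CLAIM (what is proved, stated in full; the proofs are below) =====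
def Claim_equal_rec : Prop := ∀ (lst : List Int) (i : Int), Dom_rec lst i → Pre_rec lst i → Spec_rec lst i (rec lst i)

-- ===== LEMMAS AND PROOFS =====

-- the k-th masked row, Nat-indexed form used by the induction
def pvRow (lst : List Int) (iN : Nat) (k : Nat) : List (Option Int) :=
  (List.range lst.length).map (fun j =>
    if iN ≤ j ∧ Nat.testBit k (j - iN) then some (lst.getD j 0) else none)

lemma pv_foldl_pairs {α : Type} (g : α → α) (l : List α) (acc : List α) :
    l.foldl (fun a x => a ++ [x] ++ [g x]) acc = acc ++ l.flatMap (fun x => [x, g x]) := by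
  induction l generalizing acc with
  | nil => simp
  | cons x xs ih => simp only [List.foldl_cons, ih, List.flatMap_cons]; simp

lemma pv_range_two_mul (n : Nat) :
    List.range (2 * n) = (List.range n).flatMap (fun k => [2 * k, 2 * k + 1]) := by
  induction n with
  | zero => simp
  | succ n ih =>
    have : 2 * (n + 1) = (2 * n) + 1 + 1 := by ring
    rw [this, List.range_succ, List.range_succ, ih, List.range_succ]
    simp

lemma pv_row_even (lst : List Int) (iN k : Nat) :
    pvRow lst iN (2 * k) = pvRow lst (iN + 1) k := by
  unfold pvRow
  refine List.map_congr_left (fun j hj => ?_)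
  by_cases hji : iN + 1 ≤ j
  · have h1 : iN ≤ j := by omega
    have h2 : j - iN = (j - (iN + 1)) + 1 := by omega
    rw [h2]
    have : Nat.testBit (2 * k) (j - (iN + 1) + 1) = Nat.testBit k (j - (iN + 1)) := by
      rw [Nat.testBit_succ]; congr 1; omega
    simp [h1, hji, this]
  · by_cases hji2 : iN ≤ j
    · have hj0 : j = iN := by omega
      subst hj0
      simp [Nat.testBit_zero, Nat.mul_mod_right, hji]
    · simp [hji, hji2]

lemma pv_row_odd (lst : List Int) (iN k : Nat) :
    pvRow lst iN (2 * k + 1) = (pvRow lst (iN + 1) k).set iN (some (lst.getD iN 0)) := by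
  unfold pvRow
  apply List.ext_getElem
  · simp
  · intro j hj hj'
    simp only [List.getElem_map, List.getElem_range] at *
    rw [List.getElem_set]
    simp only [List.getElem_map, List.getElem_range]
    by_cases hji : iN = j
    · subst hji
      have : Nat.testBit (2 * k + 1) 0 = true := by
        simp [Nat.testBit_zero]
      simp [this]
    · by_cases hji1 : iN + 1 ≤ j
      · have h1 : iN ≤ j := by omega
        have h2 : j - iN = (j - (iN + 1)) + 1 := by omega
        rw [h2]
        have : Nat.testBit (2 * k + 1) (j - (iN + 1) + 1) = Nat.testBit k (j - (iN + 1)) := by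
          rw [Nat.testBit_succ]; congr 1; omega
        simp [hji, h1, hji1, this]
      · have h1 : ¬ iN ≤ j := by omega
        simp [hji, h1, hji1]

-- characterisation of A's recursion, by induction on the number of remaining positions
lemma pv_rec_eq (lst : List Int) (d : Nat) :
    ∀ iN : Nat, iN + d = lst.length →
      rec lst (iN : Int) = (List.range (2 ^ d)).map (pvRow lst iN) := by
  induction d with
  | zero =>
    intro iN h
    rw [rec.eq_def]
    have hi : (iN : Int) = (lst.length : Int) := by omega
    rw [if_pos hi]
    have hrow : pvRow lst iN 0 = lst.map (fun _ => (none : Option Int)) := by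
      unfold pvRow
      apply List.ext_getElem
      · simp
      · intro j hj hj'
        have hj2 : j < lst.length := by simpa using hj'
        have hnle : ¬ iN ≤ j := by omega
        simp [hnle]
    simp [List.range_one, hrow]
  | succ d ih =>
    intro iN h
    rw [rec.eq_def]
    have hi : ¬ ((iN : Int) = (lst.length : Int)) := by omega
    have hg : ¬ ((lst.length : Int) - (iN : Int) ≤ 0) := by omega
    rw [if_neg hi, dif_neg hg]
    have hcast : (iN : Int) + 1 = ((iN + 1 : Nat) : Int) := by push_cast; ring
    rw [hcast, ih (iN + 1) (by omega)]
    rw [pv_foldl_pairs]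
    have hlt : iN < lst.length := by omega
    have htn : (iN : Int).toNat = iN := by omega
    have h2 : 2 ^ (d + 1) = 2 * 2 ^ d := by ring
    rw [h2, pv_range_two_mul, List.map_flatMap, List.flatMap_map]
    simp only [List.nil_append, htn]
    refine congrArg (fun g => List.flatMap g (List.range (2 ^ d))) (funext (fun k => ?_))
    simp [pv_row_even lst iN k, pv_row_odd lst iN k]

-- B's bit test agrees with Nat.testBit
lemma pv_shift_testBit (k s : Nat) : ((k >>> s) &&& 1 = 1) ↔ Nat.testBit k s := by
  rw [Nat.testBit, Nat.and_one_is_mod]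
  have h2 := Nat.mod_two_eq_zero_or_one (k >>> s)
  constructor
  · intro h; simp [h]
  · intro h; simp at h; omega

-- B equals the same characterisation when 0 ≤ i
lemma pv_alt_eq (lst : List Int) (i : Int) (h : 0 ≤ i) :
    rec_alt lst i = (List.range (2 ^ ((lst.length : Int) - i).toNat)).map (pvRow lst i.toNat) := by
  unfold rec_alt pvRow
  refine List.map_congr_left (fun k _ => ?_)
  refine List.map_congr_left (fun j _ => ?_)
  refine if_congr ?_ rfl rfl
  rw [pv_shift_testBit]
  constructor
  · rintro ⟨h1, h2⟩; exact ⟨by omega, h2⟩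
  · rintro ⟨h1, h2⟩; exact ⟨by omega, h2⟩

-- ===== VERDICT (by name: the statement is the Claim_ definition above) =====
theorem rec_spec : Claim_equal_rec := by
  intro lst i _ hpre
  obtain ⟨h0, hle⟩ := hpre
  unfold Spec_rec
  have hi : (i.toNat : Int) = i := by omega
  have hd : i.toNat + ((lst.length : Int) - i).toNat = lst.length := by omega
  have hrec := pv_rec_eq lst (((lst.length : Int) - i).toNat) i.toNat hd
  rw [hi] at hrec
  rw [pv_alt_eq lst i h0, hrec]
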